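-- pv_equiv track=rewrite | github.com/maikully/tablator | tab_creator.py | generate_fingerings
-- ===== SOURCE A (Python) =====
-- from collections import defaultdict
--
-- FINGERS = [0, 1, 2, 3]
--
-- def generate_fingerings(notes, starts, ranges):
--     num_strings = len(starts)
--     string_d = defaultdict(list)
--     for i, start in enumerate(starts):
--         for j in range(ranges[i] + 1):
--             string_d[start+j] += [((num_strings - 1) - i, j)]
--     sequence = []
--     # build all possible (string,fret,finger) fingerings of each note in order
--     for i, note in enumerate(notes):
--         note_fingering = string_d[note[0]]
--         sequence += [[(string, fret, finger)
--                       for string, fret in note_fingering for finger in FINGERS]]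
--     return sequence
-- ===== SOURCE B (Python) =====
-- FINGERS = [0, 1, 2, 3]
--
-- def generate_fingerings(notes, starts, ranges):
--     # Direct scan per note: no precomputed pitch->positions dict.
--     num_strings = len(starts)
--     sequence = []
--     for note in notes:
--         fingering = []
--         for i, start in enumerate(starts):
--             for j in range(ranges[i] + 1):
--                 if start + j == note[0]:
--                     for finger in FINGERS:
--                         fingering.append(((num_strings - 1) - i, j, finger))
--         sequence.append(fingering)
--     return sequence
-- ===== Notes on version B (the rewrite author's own statement) =====
-- stated objective: alternative
-- what changed: B drops A's precomputed defaultdict index from pitch to positions and instead, for each note, scans strings and frets directly, emitting (string, fret, finger) triples inline in one nested loop.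
import Mathlib
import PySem

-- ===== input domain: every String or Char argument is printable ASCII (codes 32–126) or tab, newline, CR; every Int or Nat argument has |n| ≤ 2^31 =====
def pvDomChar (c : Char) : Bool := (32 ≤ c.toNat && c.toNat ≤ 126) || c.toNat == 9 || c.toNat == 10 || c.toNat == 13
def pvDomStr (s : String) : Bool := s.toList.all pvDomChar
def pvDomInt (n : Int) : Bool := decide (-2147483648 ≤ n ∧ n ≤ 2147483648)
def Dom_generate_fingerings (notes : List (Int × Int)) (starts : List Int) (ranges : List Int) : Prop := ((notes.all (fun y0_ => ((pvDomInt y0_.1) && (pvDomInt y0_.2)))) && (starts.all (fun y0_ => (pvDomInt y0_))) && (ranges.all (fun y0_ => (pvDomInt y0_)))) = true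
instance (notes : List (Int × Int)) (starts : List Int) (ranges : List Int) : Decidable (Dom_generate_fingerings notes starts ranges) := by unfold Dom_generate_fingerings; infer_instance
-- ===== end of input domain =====

-- B replaces A's precomputed pitch->positions dict with a per-note direct scan of strings/frets (alternative decomposition, same results).

-- ===== PORT A =====
-- FINGERS = [0, 1, 2, 3]
def FINGERS : List Int := [0, 1, 2, 3]

-- the defaultdict build loop: string_d[start+j] += [((num_strings-1)-i, j)]
def gf_stringD (starts : List Int) (ranges : List Int) : PySem.Dict Int (List (Int × Int)) :=
  (PySem.List.enumerate starts).foldl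
    (fun d p =>
      (PySem.List.pyRange 0 ((PySem.List.pyGet? ranges p.1).getD 0 + 1) 1).foldl
        (fun d j => d.modify (p.2 + j) [] (· ++ [(((starts.length : Int) - 1) - p.1, j)])) d)
    PySem.Dict.empty

def generate_fingerings (notes : List (Int × Int)) (starts : List Int) (ranges : List Int) : List (List (Int × Int × Int)) :=
  let string_d := gf_stringD starts ranges
  notes.foldl
    (fun sequence note =>
      sequence ++ [(string_d.getD note.1 []).flatMap (fun sf => FINGERS.map (fun finger => (sf.1, sf.2, finger)))])
    []

-- ===== PORT B =====
def generate_fingerings_alt (notes : List (Int × Int)) (starts : List Int) (ranges : List Int) : List (List (Int × Int × Int)) :=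
  notes.foldl
    (fun sequence note =>
      sequence ++
        [(PySem.List.enumerate starts).foldl
          (fun fingering p =>
            (PySem.List.pyRange 0 ((PySem.List.pyGet? ranges p.1).getD 0 + 1) 1).foldl
              (fun fingering j =>
                if p.2 + j = note.1 then
                  FINGERS.foldl (fun fingering finger => fingering ++ [(((starts.length : Int) - 1) - p.1, j, finger)]) fingering
                else fingering)
              fingering)
          []])
    []

-- ===== PRECONDITION & SPEC =====
-- Pre_ excludes exactly the inputs where Python A raises IndexError (ranges[i] for a string index i beyond ranges).
def Pre_generate_fingerings (notes : List (Int × Int)) (starts : List Int) (ranges : List Int) : Prop :=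
  starts.length ≤ ranges.length
instance (notes : List (Int × Int)) (starts : List Int) (ranges : List Int) : Decidable (Pre_generate_fingerings notes starts ranges) := by unfold Pre_generate_fingerings; infer_instance

def pvWitness_generate_fingerings : (List (Int × Int)) × List Int × List Int := ([(3, 1), (0, 2)], [0, 2], [4, 4])

def Spec_generate_fingerings (notes : List (Int × Int)) (starts : List Int) (ranges : List Int) (out : List (List (Int × Int × Int))) : Prop := out = generate_fingerings_alt notes starts ranges
instance (notes : List (Int × Int)) (starts : List Int) (ranges : List Int) (out : List (List (Int × Int × Int))) : Decidable (Spec_generate_fingerings notes starts ranges out) := by unfold Spec_generate_fingerings; infer_instance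

-- ===== CLAIM (what is proved, stated in full; the proofs are below) =====
def Claim_equal_generate_fingerings : Prop := ∀ (notes : List (Int × Int)) (starts : List Int) (ranges : List Int), Dom_generate_fingerings notes starts ranges → Pre_generate_fingerings notes starts ranges → Spec_generate_fingerings notes starts ranges (generate_fingerings notes starts ranges)

-- ===== LEMMAS AND PROOFS =====

-- append-if with a LIST appended per hit (list version of PySem.List.foldl_append_if)
theorem foldl_append_if_flat {α β : Type} (l : List α) (p : α → Bool) (g : α → List β) (acc : List β) :
    l.foldl (fun acc x => if p x then acc ++ g x else acc) acc
      = acc ++ (l.filter p).flatMap g := by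
  induction l generalizing acc with
  | nil => simp
  | cons x t ih =>
      by_cases h : p x <;> simp [h, ih, List.flatMap]

-- the dict lookup equals the direct scan
theorem gf_stringD_getD (starts ranges : List Int) (c : Int) :
    (gf_stringD starts ranges).getD c []
      = (PySem.List.enumerate starts).flatMap (fun p =>
          ((PySem.List.pyRange 0 ((PySem.List.pyGet? ranges p.1).getD 0 + 1) 1).filter
              (fun j => p.2 + j == c)).map
            (fun j => (((starts.length : Int) - 1) - p.1, j))) := by
  unfold gf_stringD
  have h1 := PySem.List.foldl_congr_mem
    (l := PySem.List.enumerate starts)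
    (f := fun (d : PySem.Dict Int (List (Int × Int))) (p : Int × Int) =>
      (PySem.List.pyRange 0 ((PySem.List.pyGet? ranges p.1).getD 0 + 1) 1).foldl
        (fun d j => d.modify (p.2 + j) [] (· ++ [(((starts.length : Int) - 1) - p.1, j)])) d)
    (g := fun (d : PySem.Dict Int (List (Int × Int))) (p : Int × Int) =>
      ((PySem.List.pyRange 0 ((PySem.List.pyGet? ranges p.1).getD 0 + 1) 1).map
          (fun j => (p.2 + j, (((starts.length : Int) - 1) - p.1, j)))).foldl
        (fun d q => d.modify q.1 [] (· ++ [q.2])) d)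
    (init := PySem.Dict.empty)
    (fun d p _ => by simp only [List.foldl_map])
  rw [h1, ← List.foldl_flatMap, PySem.Dict.getD_foldl_modify_append]
  simp [List.filter_flatMap, List.map_flatMap, List.filter_map, List.map_map, Function.comp_def]

-- per-note equality
theorem per_note_eq (starts ranges : List Int) (c : Int) :
    ((gf_stringD starts ranges).getD c []).flatMap
        (fun sf => FINGERS.map (fun finger => (sf.1, sf.2, finger)))
      = (PySem.List.enumerate starts).foldl
          (fun fingering p =>
            (PySem.List.pyRange 0 ((PySem.List.pyGet? ranges p.1).getD 0 + 1) 1).foldl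
              (fun fingering j =>
                if p.2 + j = c then
                  fingering ++ FINGERS.map (fun finger => (((starts.length : Int) - 1) - p.1, j, finger))
                else fingering)
              fingering)
          [] := by
  rw [gf_stringD_getD]
  have houter : ∀ (p : Int × Int) (fingering : List (Int × Int × Int)),
      (PySem.List.pyRange 0 ((PySem.List.pyGet? ranges p.1).getD 0 + 1) 1).foldl
          (fun fingering j =>
            if p.2 + j = c then
              fingering ++ FINGERS.map (fun finger => (((starts.length : Int) - 1) - p.1, j, finger))
            else fingering)
          fingering
        = fingering ++
            ((PySem.List.pyRange 0 ((PySem.List.pyGet? ranges p.1).getD 0 + 1) 1).filter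
                (fun j => p.2 + j == c)).flatMap
              (fun j => FINGERS.map (fun finger => (((starts.length : Int) - 1) - p.1, j, finger))) := by
    intro p fingering
    rw [← foldl_append_if_flat]
    congr 1
    funext acc j
    by_cases h : p.2 + j = c <;> simp [h]
  have h2 := PySem.List.foldl_congr_mem
    (l := PySem.List.enumerate starts)
    (f := fun (fingering : List (Int × Int × Int)) (p : Int × Int) =>
      (PySem.List.pyRange 0 ((PySem.List.pyGet? ranges p.1).getD 0 + 1) 1).foldl
        (fun fingering j =>
          if p.2 + j = c then
            fingering ++ FINGERS.map (fun finger => (((starts.length : Int) - 1) - p.1, j, finger))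
          else fingering)
        fingering)
    (g := fun (fingering : List (Int × Int × Int)) (p : Int × Int) =>
      fingering ++
        ((PySem.List.pyRange 0 ((PySem.List.pyGet? ranges p.1).getD 0 + 1) 1).filter
            (fun j => p.2 + j == c)).flatMap
          (fun j => FINGERS.map (fun finger => (((starts.length : Int) - 1) - p.1, j, finger))))
    (init := ([] : List (Int × Int × Int)))
    (fun fingering p _ => houter p fingering)
  rw [h2, PySem.List.foldl_append_eq_flatMap]
  simp [List.flatMap_assoc, List.flatMap_map]

-- ===== VERDICT (by name: the statement is the Claim_ definition above) =====
theorem generate_fingerings_spec : Claim_equal_generate_fingerings := by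
  intro notes starts ranges _ _
  unfold Spec_generate_fingerings generate_fingerings generate_fingerings_alt
  simp only [PySem.List.foldl_append_singleton_eq_map, List.nil_append]
  exact List.map_congr_left (fun note _ => per_note_eq starts ranges note.1)
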